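-- pv_equiv track=rewrite | github.com/pvial00/Uvajda-Counter | bit_flip_counting_machine.py | venus_counterBA
-- ===== SOURCE A (Python) =====
-- def venus_counterBA(bit_stream, bit_stream_length, level=1):
--     r = [0, 1]
--     c = 1
--     q = 1
--     for x in range(bit_stream_length-level):
--         q ^= bit_stream[x]
--         r[c] ^= q
--         c = (c + 1) & 0x01
--     if r[0] == 1:
--         return 1
--     else:
--         return 0
-- ===== SOURCE B (Python) =====
-- def venus_counterBA(bit_stream, bit_stream_length, level=1):
--     # Process the stream two bits per iteration: the returned parity r[0] only
--     # accumulates the (1-xored) prefix XOR at odd positions, so one loop of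
--     # n // 2 paired steps suffices -- no alternating slot list, no parity counter.
--     n = bit_stream_length - level
--     q = 1
--     acc = 0
--     for j in range(n // 2):
--         q ^= bit_stream[2 * j]
--         q ^= bit_stream[2 * j + 1]
--         acc ^= q
--     return 1 if acc == 1 else 0
-- ===== Notes on version B (the rewrite author's own statement) =====
-- stated objective: alternative
-- what changed: Replaces the alternating two-slot accumulator list with a single loop over n//2 paired steps: since r[0] only absorbs the prefix XOR at odd positions, B folds the bits two at a time (half the iterations, no slot list, no parity counter).
import Mathlib
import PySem

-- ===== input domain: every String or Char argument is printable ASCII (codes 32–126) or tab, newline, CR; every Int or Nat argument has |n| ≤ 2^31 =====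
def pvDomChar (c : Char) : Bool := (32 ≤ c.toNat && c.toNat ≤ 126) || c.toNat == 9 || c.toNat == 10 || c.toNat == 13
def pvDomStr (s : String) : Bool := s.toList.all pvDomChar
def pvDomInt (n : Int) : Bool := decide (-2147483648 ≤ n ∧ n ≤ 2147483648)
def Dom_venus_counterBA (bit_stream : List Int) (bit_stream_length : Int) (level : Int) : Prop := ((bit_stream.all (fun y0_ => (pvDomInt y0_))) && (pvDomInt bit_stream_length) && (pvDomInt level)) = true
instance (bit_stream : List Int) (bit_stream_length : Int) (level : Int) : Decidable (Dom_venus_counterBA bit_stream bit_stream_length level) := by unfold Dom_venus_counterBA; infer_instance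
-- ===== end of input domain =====

-- ===== PORT A =====
-- B folds the bit stream two positions per step (only odd positions feed r[0]),
-- replacing A's alternating two-slot list; same cost class, different decomposition.
def stepA (bit_stream : List Int) (s : Int × Int × Int × Int) (x : Int) : Int × Int × Int × Int :=
  -- s = (r0, r1, c, q); r[c] ^= q written out for c ∈ {0,1} (c is always 0 or 1 in A)
  let q := PySem.Int.bxor s.2.2.2 (PySem.List.pyGetD bit_stream x 0)
  let r := if s.2.2.1 == 1 then (s.1, PySem.Int.bxor s.2.1 q) else (PySem.Int.bxor s.1 q, s.2.1)
  (r.1, r.2, PySem.Int.band (s.2.2.1 + 1) 1, q)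

def venus_counterBA (bit_stream : List Int) (bit_stream_length : Int) (level : Int) : Int :=
  let s := (PySem.List.pyRange 0 (bit_stream_length - level) 1).foldl (stepA bit_stream) (0, 1, 1, 1)
  if s.1 == 1 then 1 else 0

-- ===== PORT B =====
def stepB (bit_stream : List Int) (s : Int × Int) (j : Int) : Int × Int :=
  -- s = (q, acc)
  let q := PySem.Int.bxor s.1 (PySem.List.pyGetD bit_stream (2 * j) 0)
  let q := PySem.Int.bxor q (PySem.List.pyGetD bit_stream (2 * j + 1) 0)
  (q, PySem.Int.bxor s.2 q)

def venus_counterBA_alt (bit_stream : List Int) (bit_stream_length : Int) (level : Int) : Int :=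
  let n := bit_stream_length - level
  let s := (PySem.List.pyRange 0 (PySem.Int.floordiv n 2) 1).foldl (stepB bit_stream) (1, 0)
  if s.2 == 1 then 1 else 0

-- ===== PRECONDITION & SPEC =====
-- Pre_ excludes exactly the inputs where Python A raises IndexError: it reads
-- bit_stream[x] for every x < bit_stream_length - level.
def Pre_venus_counterBA (bit_stream : List Int) (bit_stream_length : Int) (level : Int) : Prop :=
  bit_stream_length - level ≤ (bit_stream.length : Int)
instance (bit_stream : List Int) (bit_stream_length : Int) (level : Int) : Decidable (Pre_venus_counterBA bit_stream bit_stream_length level) := by unfold Pre_venus_counterBA; infer_instance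

def pvWitness_venus_counterBA : List Int × Int × Int := ([1, 0, 1], 3, 1)

def Spec_venus_counterBA (bit_stream : List Int) (bit_stream_length : Int) (level : Int) (out : Int) : Prop := out = venus_counterBA_alt bit_stream bit_stream_length level
instance (bit_stream : List Int) (bit_stream_length : Int) (level : Int) (out : Int) : Decidable (Spec_venus_counterBA bit_stream bit_stream_length level out) := by unfold Spec_venus_counterBA; infer_instance

-- ===== CLAIM (what is proved, stated in full; the proofs are below) =====
def Claim_equal_venus_counterBA : Prop := ∀ (bit_stream : List Int) (bit_stream_length : Int) (level : Int), Dom_venus_counterBA bit_stream bit_stream_length level → Pre_venus_counterBA bit_stream bit_stream_length level → Spec_venus_counterBA bit_stream bit_stream_length level (venus_counterBA bit_stream bit_stream_length level)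

-- ===== LEMMAS AND PROOFS =====

-- After 2*k iterations of A's loop, A's state is (acc, _, 1, q) where (q, acc) is
-- B's state after k paired iterations.
lemma pair_inv (bs : List Int) (k : Nat) :
    (((PySem.List.pyRange 0 (2 * (k : Int)) 1).foldl (stepA bs) (0, 1, 1, 1)).1
        = ((PySem.List.pyRange 0 (k : Int) 1).foldl (stepB bs) (1, 0)).2)
    ∧ (((PySem.List.pyRange 0 (2 * (k : Int)) 1).foldl (stepA bs) (0, 1, 1, 1)).2.2.1 = 1)
    ∧ (((PySem.List.pyRange 0 (2 * (k : Int)) 1).foldl (stepA bs) (0, 1, 1, 1)).2.2.2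
        = ((PySem.List.pyRange 0 (k : Int) 1).foldl (stepB bs) (1, 0)).1) := by
  induction k with
  | zero =>
      norm_num [PySem.List.pyRange_one_eq_nil]
  | succ k ih =>
      have h2 : (2 * ((k + 1 : Nat) : Int)) = (2 * (k : Int) + 1) + 1 := by push_cast; ring
      have hA : PySem.List.pyRange 0 (2 * ((k + 1 : Nat) : Int)) 1
          = (PySem.List.pyRange 0 (2 * (k : Int)) 1 ++ [2 * (k : Int)]) ++ [2 * (k : Int) + 1] := by
        rw [h2, PySem.List.pyRange_one_succ_right (by positivity),
            PySem.List.pyRange_one_succ_right (by positivity)]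
      have hB : PySem.List.pyRange 0 ((k + 1 : Nat) : Int) 1
          = PySem.List.pyRange 0 (k : Int) 1 ++ [(k : Int)] := by
        push_cast
        exact PySem.List.pyRange_one_succ_right (by positivity)
      obtain ⟨ih1, ih2, ih3⟩ := ih
      rw [hA, hB, List.foldl_append, List.foldl_append, List.foldl_append]
      simp only [List.foldl_cons, List.foldl_nil]
      set sA := (PySem.List.pyRange 0 (2 * (k : Int)) 1).foldl (stepA bs) (0, 1, 1, 1) with hsA
      set sB := (PySem.List.pyRange 0 (k : Int) 1).foldl (stepB bs) (1, 0) with hsB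
      obtain ⟨r0, r1, c, q⟩ := sA
      obtain ⟨qb, acc⟩ := sB
      simp only at ih1 ih2 ih3
      subst ih1 ih2 ih3
      simp only [stepA, stepB]
      norm_num [PySem.Int.band]

-- value of floordiv on natural casts and on nonpositive arguments
lemma floordiv_two_cast (m : Nat) : PySem.Int.floordiv ((m : Nat) : Int) 2 = ((m / 2 : Nat) : Int) := by
  rw [PySem.Int.floordiv_eq_ediv_of_pos (by norm_num)]
  omega

lemma floordiv_two_nonpos (n : Int) (h : n ≤ 0) : PySem.Int.floordiv n 2 ≤ 0 := by
  rw [PySem.Int.floordiv_eq_ediv_of_pos (by norm_num)]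
  omega

-- ===== VERDICT (by name: the statement is the Claim_ definition above) =====
theorem venus_counterBA_spec : Claim_equal_venus_counterBA := by
  intro bs L lvl _ _
  unfold Spec_venus_counterBA
  simp only [venus_counterBA, venus_counterBA_alt]
  set n := L - lvl with hn
  by_cases hpos : n ≤ 0
  · rw [PySem.List.pyRange_one_eq_nil hpos,
        PySem.List.pyRange_one_eq_nil (floordiv_two_nonpos n hpos)]
    norm_num
  · push Not at hpos
    obtain ⟨m, hm⟩ : ∃ m : Nat, n = (m : Int) := ⟨n.toNat, by omega⟩
    rw [hm, floordiv_two_cast]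
    rcases Nat.even_or_odd m with ⟨k, hk⟩ | ⟨k, hk⟩
    · -- even: m = 2k
      have hmk : ((m : Nat) : Int) = 2 * (k : Int) := by omega
      have hdiv : ((m / 2 : Nat) : Int) = ((k : Nat) : Int) := by push_cast; omega
      rw [hmk, hdiv]
      obtain ⟨h1, -, -⟩ := pair_inv bs k
      rw [h1]
    · -- odd: m = 2k+1, the extra step only touches r1 and q
      have hmk : ((m : Nat) : Int) = 2 * (k : Int) + 1 := by omega
      have hdiv : ((m / 2 : Nat) : Int) = ((k : Nat) : Int) := by push_cast; omega
      rw [hmk, hdiv,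
          PySem.List.pyRange_one_succ_right (by positivity), List.foldl_append]
      simp only [List.foldl_cons, List.foldl_nil]
      obtain ⟨h1, h2, h3⟩ := pair_inv bs k
      set sA := (PySem.List.pyRange 0 (2 * (k : Int)) 1).foldl (stepA bs) (0, 1, 1, 1)
      obtain ⟨r0, r1, c, q⟩ := sA
      simp only at h1 h2 h3
      subst h1 h2 h3
      simp [stepA]
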